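-- pv_equiv track=rewrite | github.com/JaredTully/C200jttully | Assignment9/rec.py | gm
-- ===== SOURCE A (Python) =====
-- def gm(n):
--     d = {}
--     if n ==0:
--         return 1
--     else:
--         if not n in d.keys():
--             d[n] = 1 + 2 * 2
--             return 1 + 2 * gm(n-1)
--         else:
--             return d(n) + gm(n-1)
-- ===== SOURCE B (Python) =====
-- def gm(n):
--     return 2 ** (n + 1) - 1
-- ===== Notes on version B (the rewrite author's own statement) =====
-- stated objective: faster
-- what changed: replaces the linear recursion gm(n)=1+2*gm(n-1) (whose dict is dead code: d is rebuilt empty every call) with the closed form 2^(n+1)-1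
import Mathlib
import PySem

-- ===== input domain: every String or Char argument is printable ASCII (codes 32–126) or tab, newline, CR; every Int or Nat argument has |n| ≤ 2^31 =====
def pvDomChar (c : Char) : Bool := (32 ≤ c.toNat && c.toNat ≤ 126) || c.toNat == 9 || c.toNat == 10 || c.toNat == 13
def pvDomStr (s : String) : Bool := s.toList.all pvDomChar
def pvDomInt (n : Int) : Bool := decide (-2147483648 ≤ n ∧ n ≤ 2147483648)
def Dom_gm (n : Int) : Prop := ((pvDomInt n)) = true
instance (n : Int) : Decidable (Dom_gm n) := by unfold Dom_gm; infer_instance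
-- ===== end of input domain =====

-- B computes the closed form 2^(n+1)-1 instead of A's linear recursion; A's dict is dead code.

-- ===== PORT A =====
-- A's dict d is rebuilt empty on every call, so the 'n in d.keys()' branch is never taken;
-- the port transcribes the branch order. The 'else' arm for n < 0 (Python: infinite recursion,
-- RecursionError, excluded by Pre_) is a totalization guard only.
def gm (n : Int) : Int :=
  if n = 0 then 1
  else if 0 < n then 1 + 2 * gm (n - 1)
  else 0
termination_by n.toNat
decreasing_by omega

-- ===== PORT B =====
def gm_alt (n : Int) : Int := 2 ^ (n + 1).toNat - 1

-- ===== PRECONDITION & SPEC =====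
-- Pre_ excludes n < 0, on which Python A recurses forever (RecursionError).
def Pre_gm (n : Int) : Prop := 0 ≤ n
instance (n : Int) : Decidable (Pre_gm n) := by unfold Pre_gm; infer_instance
def pvWitness_gm : Int := 3

def Spec_gm (n : Int) (out : Int) : Prop := out = gm_alt n
instance (n : Int) (out : Int) : Decidable (Spec_gm n out) := by unfold Spec_gm; infer_instance

-- ===== CLAIM (what is proved, stated in full; the proofs are below) =====
def Claim_equal_gm : Prop := ∀ (n : Int), Dom_gm n → Pre_gm n → Spec_gm n (gm n)

-- ===== LEMMAS AND PROOFS =====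
lemma gm_closed (k : Nat) : ∀ (n : Int), n.toNat = k → 0 ≤ n → gm n = 2 ^ (n + 1).toNat - 1 := by
  induction k with
  | zero =>
    intro n hk hn
    have : n = 0 := by omega
    subst this
    simp [gm]
  | succ k ih =>
    intro n hk hn
    have hne : n ≠ 0 := by omega
    have hpos : 0 < n := by omega
    rw [gm]
    simp only [hne, if_false, hpos, if_true]
    have h1 : (n - 1).toNat = k := by omega
    rw [ih (n - 1) h1 (by omega)]
    have h2 : (n - 1 + 1).toNat = k + 1 := by omega
    have h3 : (n + 1).toNat = k + 2 := by omega
    rw [h2, h3]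
    ring_nf

-- ===== VERDICT (by name: the statement is the Claim_ definition above) =====
theorem gm_spec : Claim_equal_gm := by
  intro n _ hp
  unfold Spec_gm gm_alt
  exact gm_closed n.toNat n rfl hp
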